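-- pv_equiv track=rewrite | github.com/tinsukE/advent-of-code | 2024/25.py | parse_item
-- ===== SOURCE A (Python) =====
-- def parse_item(lines):
-- 	depths = []
-- 	for depth in range(len(lines[0])):
-- 		for i in range(len(lines)):
-- 			if lines[i][depth] != '#':
-- 				depths.append(i)
-- 				break
-- 	return depths
-- ===== SOURCE B (Python) =====
-- def parse_item(lines):
-- 	found = {}
-- 	for i, line in enumerate(lines):
-- 		for d, ch in enumerate(line):
-- 			if ch != '#' and d not in found:
-- 				found[d] = i
-- 	return [found[d] for d in range(len(lines[0])) if d in found]
-- ===== Notes on version B (the rewrite author's own statement) =====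
-- stated objective: alternative
-- what changed: Replaces A's column-major scans with per-column early break by a single row-major sweep that records, in a dict, the first row index seen for each column with a non-'#' cell, then emits the recorded rows in column order.
import Mathlib
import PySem

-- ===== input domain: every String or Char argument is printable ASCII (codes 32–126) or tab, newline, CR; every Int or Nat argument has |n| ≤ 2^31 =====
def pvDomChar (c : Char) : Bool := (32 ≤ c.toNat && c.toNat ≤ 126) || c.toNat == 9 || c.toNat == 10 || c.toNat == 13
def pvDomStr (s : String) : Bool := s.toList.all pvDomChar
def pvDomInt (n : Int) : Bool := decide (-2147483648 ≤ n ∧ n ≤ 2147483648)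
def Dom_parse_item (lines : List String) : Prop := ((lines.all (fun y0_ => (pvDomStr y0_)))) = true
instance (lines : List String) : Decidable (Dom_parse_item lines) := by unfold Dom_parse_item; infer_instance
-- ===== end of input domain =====

-- B replaces A's column-major scan with early break by a single row-major sweep
-- building a first-seen dict per column (objective: alternative decomposition, same cost).

-- ===== PORT A =====
-- inner 'for i in range(len(lines))' loop of A, with its break: first i whose cell at
-- column d is not '#'. Out-of-range access (where Python raises IndexError, excluded by
-- Pre_) is defaulted to '#' / "" and scanning continues.
def pvColScanA (lines : List String) (d : Int) : List Int → Option Int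
  | [] => none
  | i :: rest =>
    if ((PySem.Str.pyGet? ((PySem.List.pyGet? lines i).getD "") d).getD '#') ≠ '#' then some i
    else pvColScanA lines d rest

def parse_item (lines : List String) : List Int :=
  (PySem.List.pyRange 0 (PySem.Str.len ((PySem.List.pyGet? lines 0).getD "")) 1).foldl
    (fun depths d =>
      match pvColScanA lines d (PySem.List.pyRange 0 (lines.length : Int) 1) with
      | some i => depths ++ [i]
      | none => depths) []

-- ===== PORT B =====
def parse_item_alt (lines : List String) : List Int :=
  let found : PySem.Dict Int Int :=
    (PySem.List.enumerate lines 0).foldl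
      (fun f p =>
        (PySem.List.enumerate p.2.toList 0).foldl
          (fun f q =>
            if q.2 != '#' && !(PySem.Dict.contains f q.1) then PySem.Dict.insert f q.1 p.1 else f)
          f)
      PySem.Dict.empty
  (PySem.List.pyRange 0 (PySem.Str.len ((PySem.List.pyGet? lines 0).getD "")) 1).foldl
    (fun acc d =>
      match PySem.Dict.get? found d with
      | some v => acc ++ [v]
      | none => acc) []

-- ===== PRECONDITION & SPEC =====
-- row j of the grid, as a list of characters ("" when j is out of range)
def pvRowL (lines : List String) (j : Nat) : List Char := ((lines[j]?).getD "").toList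

-- exactly the inputs on which Python A returns: lines is nonempty, and no column scan
-- reaches a row too short for that column before finding a non-'#' cell (else IndexError)
def Pre_parse_item (lines : List String) : Prop :=
  lines ≠ [] ∧ ∀ d < (pvRowL lines 0).length, ∀ i < lines.length,
    (∀ j < i, (pvRowL lines j)[d]? = some '#') → d < (pvRowL lines i).length
instance (lines : List String) : Decidable (Pre_parse_item lines) := by
  unfold Pre_parse_item; infer_instance

def pvWitness_parse_item : List String := ["#.", ".#"]

def Spec_parse_item (lines : List String) (out : List Int) : Prop := out = parse_item_alt lines
instance (lines : List String) (out : List Int) : Decidable (Spec_parse_item lines out) := by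
  unfold Spec_parse_item; infer_instance

-- ===== CLAIM (what is proved, stated in full; the proofs are below) =====
def Claim_equal_parse_item : Prop :=
  ∀ (lines : List String), Dom_parse_item lines → Pre_parse_item lines →
    Spec_parse_item lines (parse_item lines)

-- ===== LEMMAS AND PROOFS =====

-- did this row's cell at column k exist and differ from '#'? (B's inner-loop condition, abstracted)
def pvRowHit (s : String) (k : Int) : Bool :=
  (PySem.List.enumerate s.toList 0).any (fun q => q.1 == k && q.2 != '#')

-- first row index (in order) whose row hits column k
def pvSpecFirst : List (Int × String) → Int → Option Int
  | [], _ => none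
  | (i, s) :: rest, k => if pvRowHit s k then some i else pvSpecFirst rest k

lemma pvRowHit_eq (s : String) (d : Int) (hd : 0 ≤ d) :
    pvRowHit s d = ((PySem.Str.pyGet? s d).getD '#' != '#') := by
  obtain ⟨n, rfl⟩ : ∃ n : Nat, d = (n : Int) := ⟨d.toNat, (Int.toNat_of_nonneg hd).symm⟩
  rw [PySem.Str.pyGet?_natCast, Bool.eq_iff_iff]
  simp only [pvRowHit, List.any_eq_true, PySem.List.mem_enumerate_iff, zero_add,
    Bool.and_eq_true, beq_iff_eq, bne_iff_ne, ne_eq]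
  constructor
  · rintro ⟨q, ⟨k, hk, rfl⟩, hkn, hne⟩
    have hkn' : k = n := by
      have h2 : (k : Int) = (n : Int) := by simpa using hkn
      exact_mod_cast h2
    subst hkn'
    rw [List.getElem?_eq_getElem hk]
    exact hne
  · intro h
    rcases hg : s.toList[n]? with _ | c
    · rw [hg] at h
      exact absurd rfl h
    · rw [hg] at h
      have hn : n < s.toList.length := (List.getElem?_eq_some_iff.mp hg).1
      have hc : s.toList[n] = c := (List.getElem?_eq_some_iff.mp hg).2
      exact ⟨(↑n, c), ⟨n, hn, by rw [hc]⟩, rfl, h⟩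

lemma pvInner_get? (i : Int) (l : List (Int × Char)) (f : PySem.Dict Int Int) (k : Int) :
    (l.foldl
      (fun f q =>
        if q.2 != '#' && !(PySem.Dict.contains f q.1) then PySem.Dict.insert f q.1 i else f)
      f).get? k
    = if f.contains k then f.get? k
      else (if l.any (fun q => q.1 == k && q.2 != '#') then some i else none) := by
  induction l generalizing f with
  | nil =>
    simp only [List.foldl_nil, List.any_nil, Bool.false_eq_true, if_false]
    by_cases h : f.contains k = true
    · rw [if_pos h]
    · rw [if_neg h]
      have hs : (f.get? k).isSome = false := by
        rw [← PySem.Dict.contains_eq_isSome_get?]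
        simpa using h
      rcases hg : f.get? k with _ | v
      · rfl
      · rw [hg] at hs
        simp at hs
  | cons q rest ih =>
    rcases q with ⟨a, c⟩
    simp only [List.foldl_cons, List.any_cons]
    by_cases hc : c = '#'
    · subst hc
      simp only [bne_self_eq_false, Bool.false_and, Bool.and_false, Bool.false_or,
        Bool.false_eq_true, if_false]
      exact ih f
    · by_cases hf : f.contains a = true
      · have hg : (c != '#' && !(f.contains a)) = false := by simp [hf]
        simp only [hg, Bool.false_eq_true, if_false]
        rw [ih f]
        by_cases hfk : f.contains k = true
        · simp [hfk]
        · have hak : (a == k) = false := by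
            rcases eq_or_ne a k with rfl | hne
            · exact absurd hf hfk
            · simpa using hne
          simp [hfk, hak]
      · have hg : (c != '#' && !(f.contains a)) = true := by
          simp [hc, hf]
        simp only [hg, if_true]
        rw [ih (f.insert a i)]
        by_cases hk : k = a
        · subst hk
          have hfk : f.contains k = false := by simpa using hf
          simp [PySem.Dict.get?_insert_self, hfk, hc]
        · have h1 : (f.insert a i).contains k = f.contains k := by
            rw [PySem.Dict.contains_insert]
            simp [hk]
          have h2 : (f.insert a i).get? k = f.get? k :=
            PySem.Dict.get?_insert_of_ne f i hk
          have hak : (a == k) = false := by simpa using (Ne.symm hk)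
          rw [h1, h2]
          simp [hak]

lemma pvOuter_get? (rows : List (Int × String)) (f : PySem.Dict Int Int) (k : Int) :
    (rows.foldl
      (fun f p =>
        (PySem.List.enumerate p.2.toList 0).foldl
          (fun f q =>
            if q.2 != '#' && !(PySem.Dict.contains f q.1) then PySem.Dict.insert f q.1 p.1 else f)
          f)
      f).get? k
    = if f.contains k then f.get? k else pvSpecFirst rows k := by
  induction rows generalizing f with
  | nil =>
    simp only [List.foldl_nil, pvSpecFirst]
    by_cases h : f.contains k = true
    · rw [if_pos h]
    · rw [if_neg h]
      have hs : (f.get? k).isSome = false := by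
        rw [← PySem.Dict.contains_eq_isSome_get?]
        simpa using h
      rcases hg : f.get? k with _ | v
      · rfl
      · rw [hg] at hs
        simp at hs
  | cons p rest ih =>
    rcases p with ⟨i, s⟩
    simp only [List.foldl_cons]
    rw [ih]
    have hget : ((PySem.List.enumerate s.toList 0).foldl
        (fun f q =>
          if q.2 != '#' && !(PySem.Dict.contains f q.1) then PySem.Dict.insert f q.1 i else f)
        f).get? k
        = if f.contains k = true then f.get? k
          else if pvRowHit s k = true then some i else none := by
      unfold pvRowHit
      exact pvInner_get? i (PySem.List.enumerate s.toList 0) f k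
    have hcont : ((PySem.List.enumerate s.toList 0).foldl
        (fun f q =>
          if q.2 != '#' && !(PySem.Dict.contains f q.1) then PySem.Dict.insert f q.1 i else f)
        f).contains k = (f.contains k || pvRowHit s k) := by
      rw [PySem.Dict.contains_eq_isSome_get?, hget]
      by_cases h1 : f.contains k = true
      · simp [h1, ← PySem.Dict.contains_eq_isSome_get?]
      · have h1' : f.contains k = false := by simpa using h1
        by_cases h2 : pvRowHit s k = true
        · simp [h1', h2]
        · have h2' : pvRowHit s k = false := by simpa using h2
          simp [h1', h2']
    rw [hcont, hget]
    by_cases h1 : f.contains k = true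
    · simp [h1]
    · have h1' : f.contains k = false := by simpa using h1
      by_cases h2 : pvRowHit s k = true
      · simp [h1', h2, pvSpecFirst]
      · have h2' : pvRowHit s k = false := by simpa using h2
        simp [h1', h2', pvSpecFirst]

lemma pvScan_eq_aux (lines : List String) (d : Int) (hd : 0 ≤ d) (i : Nat) :
    pvColScanA lines d (PySem.List.pyRange (i : Int) (lines.length : Int) 1)
    = pvSpecFirst (PySem.List.enumerate (lines.drop i) (i : Int)) d := by
  rcases Nat.lt_or_ge i lines.length with hi | hi
  · have hcast : ((i : Int) < (lines.length : Int)) := by exact_mod_cast hi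
    rw [PySem.List.pyRange_one_cons hcast]
    rw [List.drop_eq_getElem_cons hi, PySem.List.enumerate_cons]
    simp only [pvColScanA, pvSpecFirst]
    have hlookup : (PySem.List.pyGet? lines (i : Int)).getD "" = lines[i] := by
      rw [PySem.List.pyGet?_natCast, List.getElem?_eq_getElem hi]
      rfl
    rw [hlookup, pvRowHit_eq lines[i] d hd]
    by_cases hch : (PySem.Str.pyGet? lines[i] d).getD '#' = '#'
    · rw [if_neg (by simpa using hch), if_neg (by simpa using hch)]
      have hstep : ((i : Int) + 1) = ((i + 1 : Nat) : Int) := by push_cast; ring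
      rw [hstep]
      exact pvScan_eq_aux lines d hd (i + 1)
    · rw [if_pos (by simpa using hch), if_pos (by simpa using hch)]
  · have h1 : PySem.List.pyRange (i : Int) (lines.length : Int) 1 = [] := by
      apply PySem.List.pyRange_one_eq_nil
      exact_mod_cast hi
    rw [h1, List.drop_eq_nil_of_le hi]
    simp [pvColScanA, PySem.List.enumerate_nil, pvSpecFirst]
termination_by lines.length - i
decreasing_by omega

-- ===== VERDICT (by name: the statement is the Claim_ definition above) =====
theorem parse_item_spec : Claim_equal_parse_item := by
  intro lines _ _
  unfold Spec_parse_item parse_item parse_item_alt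
  apply PySem.List.foldl_congr_mem
  intro acc d hd
  have hd0 : 0 ≤ d := (PySem.List.mem_pyRange_one.mp hd).1
  have hA := pvScan_eq_aux lines d hd0 0
  simp only [Nat.cast_zero, List.drop_zero] at hA
  have hB := pvOuter_get? (PySem.List.enumerate lines 0) PySem.Dict.empty d
  rw [PySem.Dict.contains_empty] at hB
  simp only [Bool.false_eq_true, if_false] at hB
  rw [hA, hB]
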